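-- pv_equiv track=rewrite | github.com/YvensLG/MA102 | tarefa05/sequencias.py | diferencas
-- ===== SOURCE A (Python) =====
-- def distancia_hamming(a, b):
--     dist=0
--
--     for i in range(len(a)):
--         if a[i] != b[i]:
--             dist+=1
--
--     return dist
--
-- def janela(sequencia, indice_inicial, tamanho_janela):
--     final=''
--     for i in range(indice_inicial, indice_inicial+tamanho_janela):
--         final+=sequencia[i]
--
--     return final
--
-- def distancia_janela(a, b, indice_inicial, tamanho_janela):
--     x = janela(a, indice_inicial, tamanho_janela)
--     y = janela(b, indice_inicial, tamanho_janela)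
--
--     return distancia_hamming(x, y)
--
-- def diferencas(a, b, tamanho_janela):
--     lista=[]
--
--     for i in range(len(a)//tamanho_janela):
--         indice_inicial = tamanho_janela * i
--         dist = distancia_janela(a, b, indice_inicial, tamanho_janela)
--
--         if(dist >= tamanho_janela/3):
--             lista.append(indice_inicial)
--
--     return lista
-- ===== SOURCE B (Python) =====
-- def diferencas(a, b, tamanho_janela):
--     counts = [0] * (len(a) // tamanho_janela)
--     for i in range(len(counts) * tamanho_janela):
--         if a[i] != b[i]:
--             counts[i // tamanho_janela] += 1
--     return [tamanho_janela * j for j, c in enumerate(counts) if 3 * c >= tamanho_janela]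
-- ===== Notes on version B (the rewrite author's own statement) =====
-- stated objective: simpler
-- what changed: Replaces the janela/distancia_hamming/distancia_janela helpers (per-window string rebuilding and rescanning) with one linear bucketed sweep that accumulates mismatch counts per window, followed by a comprehension over enumerate(counts).
import Mathlib
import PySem

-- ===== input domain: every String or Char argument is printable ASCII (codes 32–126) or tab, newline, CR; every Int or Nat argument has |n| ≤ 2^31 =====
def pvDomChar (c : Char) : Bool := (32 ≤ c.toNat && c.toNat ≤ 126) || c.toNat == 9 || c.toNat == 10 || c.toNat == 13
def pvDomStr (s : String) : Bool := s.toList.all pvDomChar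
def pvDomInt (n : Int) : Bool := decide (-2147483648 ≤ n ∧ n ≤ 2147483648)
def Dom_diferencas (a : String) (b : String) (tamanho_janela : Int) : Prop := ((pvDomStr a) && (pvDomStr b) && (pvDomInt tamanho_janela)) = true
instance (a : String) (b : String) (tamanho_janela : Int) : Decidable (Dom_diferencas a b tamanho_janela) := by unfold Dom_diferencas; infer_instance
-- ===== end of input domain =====

-- B replaces A's per-window string rebuilding (janela/distancia_hamming) with one bucketed
-- linear sweep over mismatch positions; objective: simpler.
-- A character fetched by s[i] is carried as Option Char: none is exactly where Python raises
-- IndexError, and Pre_ excludes those inputs.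
-- The float test 'dist >= tamanho_janela/3' (integer dist, |tamanho_janela| ≤ 2^31) is ported
-- exactly as '3*dist ≥ tamanho_janela': tamanho_janela/3 never rounds across an integer.

-- ===== PORT A =====
def distancia_hamming (x : List (Option Char)) (y : List (Option Char)) : Int :=
  (PySem.List.pyRange 0 (PySem.List.len x)).foldl
    (fun dist i => if PySem.List.pyGet? x i ≠ PySem.List.pyGet? y i then dist + 1 else dist) 0

def janela (sequencia : String) (indice_inicial : Int) (tamanho_janela : Int) : List (Option Char) :=
  (PySem.List.pyRange indice_inicial (indice_inicial + tamanho_janela)).foldl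
    (fun final i => final ++ [PySem.Str.pyGet? sequencia i]) []

def distancia_janela (a : String) (b : String) (indice_inicial : Int) (tamanho_janela : Int) : Int :=
  distancia_hamming (janela a indice_inicial tamanho_janela) (janela b indice_inicial tamanho_janela)

def diferencas (a : String) (b : String) (tamanho_janela : Int) : List Int :=
  (PySem.List.pyRange 0 (PySem.Int.floordiv (PySem.Str.len a) tamanho_janela)).foldl
    (fun lista i =>
      let indice_inicial := tamanho_janela * i
      let dist := distancia_janela a b indice_inicial tamanho_janela
      if 3 * dist ≥ tamanho_janela then lista ++ [indice_inicial] else lista) []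

-- ===== PORT B =====
def diferencas_alt (a : String) (b : String) (tamanho_janela : Int) : List Int :=
  let counts : List Int := List.replicate (PySem.Int.floordiv (PySem.Str.len a) tamanho_janela).toNat 0
  let counts := (PySem.List.pyRange 0 ((PySem.List.len counts) * tamanho_janela)).foldl
    (fun cs i =>
      if PySem.Str.pyGet? a i ≠ PySem.Str.pyGet? b i then
        PySem.List.pySetD cs (PySem.Int.floordiv i tamanho_janela)
          (PySem.List.pyGetD cs (PySem.Int.floordiv i tamanho_janela) 0 + 1)
      else cs) counts
  (PySem.List.enumerate counts).foldl
    (fun out jc => if 3 * jc.2 ≥ tamanho_janela then out ++ [tamanho_janela * jc.1] else out) []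

-- ===== PRECONDITION & SPEC =====
-- Pre_ excludes exactly where Python A raises: tamanho_janela = 0 (ZeroDivisionError) and,
-- for positive window size, a b too short for the scanned windows (IndexError in janela).
def Pre_diferencas (a : String) (b : String) (tamanho_janela : Int) : Prop :=
  tamanho_janela ≠ 0 ∧
    (0 < tamanho_janela →
      PySem.Int.floordiv (PySem.Str.len a) tamanho_janela * tamanho_janela ≤ PySem.Str.len b)
instance (a : String) (b : String) (tamanho_janela : Int) : Decidable (Pre_diferencas a b tamanho_janela) := by unfold Pre_diferencas; infer_instance

def pvWitness_diferencas : String × String × Int := ("ACGTAC", "ACCTTC", 3)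

def Spec_diferencas (a : String) (b : String) (tamanho_janela : Int) (out : List Int) : Prop := out = diferencas_alt a b tamanho_janela
instance (a : String) (b : String) (tamanho_janela : Int) (out : List Int) : Decidable (Spec_diferencas a b tamanho_janela out) := by unfold Spec_diferencas; infer_instance

-- ===== CLAIM (what is proved, stated in full; the proofs are below) =====
def Claim_equal_diferencas : Prop := ∀ (a : String) (b : String) (tamanho_janela : Int), Dom_diferencas a b tamanho_janela → Pre_diferencas a b tamanho_janela → Spec_diferencas a b tamanho_janela (diferencas a b tamanho_janela)

-- ===== LEMMAS AND PROOFS =====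

-- the per-position mismatch test both programs use
def pvMM (a b : String) (i : Int) : Bool :=
  decide (PySem.Str.pyGet? a i ≠ PySem.Str.pyGet? b i)

-- mismatch count of the window starting at w*j
def pvCnt (a b : String) (w j : Int) : Int :=
  ((PySem.List.pyRange (w * j) (w * j + w)).countP (pvMM a b) : Int)

theorem pvWitness_ok : Dom_diferencas pvWitness_diferencas.1 pvWitness_diferencas.2.1 pvWitness_diferencas.2.2 ∧
    Pre_diferencas pvWitness_diferencas.1 pvWitness_diferencas.2.1 pvWitness_diferencas.2.2 := by
  constructor <;> decide

theorem janela_eq_map (s : String) (ii w : Int) :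
    janela s ii w = (PySem.List.pyRange ii (ii + w)).map (PySem.Str.pyGet? s) := by
  unfold janela
  rw [PySem.List.foldl_append_singleton_eq_map, List.nil_append]

theorem hamming_map (f g : Int → Option Char) (is : List Int) :
    distancia_hamming (is.map f) (is.map g)
      = ((is.countP (fun i => decide (f i ≠ g i)) : Nat) : Int) := by
  unfold distancia_hamming
  rw [show PySem.List.len (is.map f) = ((is.length : Nat) : Int) by
        simp [PySem.List.len_eq]]
  rw [PySem.List.pyRange_zero_nat, List.foldl_map]
  simp only [PySem.List.pyGet?_natCast]
  rw [show (fun (dist : Int) (k : Nat) =>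
        if (is.map f)[k]? ≠ (is.map g)[k]? then dist + 1 else dist)
      = (fun (dist : Int) (k : Nat) =>
        if (fun kk => decide ((is.map f)[kk]? ≠ (is.map g)[kk]?)) k = true then dist + 1 else dist) by
      funext d k; simp]
  rw [PySem.List.foldl_count_if]
  simp only [Int.zero_add, Int.natCast_inj]
  induction is using List.reverseRecOn with
  | nil => simp
  | append_singleton t x ih =>
      rw [List.length_append, List.length_singleton, List.range_succ,
        List.countP_append, List.countP_append]
      congr 1
      · rw [← ih]
        apply List.countP_congr
        intro k hk
        have hk' : k < t.length := by simpa using hk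
        simp [List.getElem?_append_left, hk']
      · simp

theorem dist_janela_eq (a b : String) (w j : Int) :
    distancia_janela a b (w * j) w = pvCnt a b w j := by
  unfold distancia_janela pvCnt
  rw [janela_eq_map, janela_eq_map, hamming_map]
  have hp : pvMM a b = fun i => decide (PySem.Str.pyGet? a i ≠ PySem.Str.pyGet? b i) := rfl
  rw [hp]

-- the B loop body
def pvStep (a b : String) (w : Int) (cs : List Int) (i : Int) : List Int :=
  if PySem.Str.pyGet? a i ≠ PySem.Str.pyGet? b i then
    PySem.List.pySetD cs (PySem.Int.floordiv i w)
      (PySem.List.pyGetD cs (PySem.Int.floordiv i w) 0 + 1)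
  else cs

theorem pvStep_length (a b : String) (w : Int) (cs : List Int) (i : Int) :
    (pvStep a b w cs i).length = cs.length := by
  unfold pvStep; split <;> simp [PySem.List.length_pySetD]

-- frame: folding indices whose bucket lies inside cs leaves an appended tail untouched
theorem pvFold_frame (a b : String) (w : Int) (is : List Int) :
    ∀ (cs tail : List Int),
      (∀ i ∈ is, 0 ≤ PySem.Int.floordiv i w ∧ (PySem.Int.floordiv i w).toNat < cs.length) →
      is.foldl (pvStep a b w) (cs ++ tail) = (is.foldl (pvStep a b w) cs) ++ tail := by
  induction is with
  | nil => intro cs tail _; rfl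
  | cons i is ih =>
      intro cs tail h
      have hi := h i (by simp)
      have hstep : pvStep a b w (cs ++ tail) i = pvStep a b w cs i ++ tail := by
        unfold pvStep
        split
        · rw [PySem.List.pySetD_of_nonneg _ _ hi.1, PySem.List.pySetD_of_nonneg _ _ hi.1,
              PySem.List.pyGetD_of_nonneg _ _ hi.1, PySem.List.pyGetD_of_nonneg _ _ hi.1]
          rw [List.getD_append _ _ _ _ hi.2]
          rw [List.set_append_left _ _ hi.2]
        · rfl
      simp only [List.foldl_cons, hstep]
      apply ih
      intro x hx
      exact ⟨(h x (by simp [hx])).1, by rw [pvStep_length]; exact (h x (by simp [hx])).2⟩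

-- accumulation: folding one window's indices over L ++ [c] adds the mismatch count to c
theorem pvFold_last (a b : String) (w : Int) (hw : 0 < w) (L : List Int) :
    ∀ (t : Nat) (c : Int), (t : Int) ≤ w →
      (PySem.List.pyRange (w * L.length) (w * L.length + t)).foldl (pvStep a b w) (L ++ [c])
        = L ++ [c + ((PySem.List.pyRange (w * L.length) (w * L.length + t)).countP (pvMM a b) : Int)] := by
  intro t
  induction t with
  | zero =>
      intro c _
      simp only [Nat.cast_zero, add_zero]
      simp [PySem.List.pyRange_one_eq_nil (le_refl (w * (L.length : Int)))]
  | succ t ih =>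
      intro c hle
      have ht : ((t : Int)) ≤ w := by push_cast at hle; omega
      have h0t : (0 : Int) ≤ (t : Int) := by positivity
      have hsplit : PySem.List.pyRange (w * L.length) (w * L.length + ((t : Nat) + 1 : Nat))
          = PySem.List.pyRange (w * L.length) (w * L.length + t) ++ [w * L.length + t] := by
        rw [show ((w * L.length + ((t : Nat) + 1 : Nat) : Int)) = (w * L.length + t) + 1 by push_cast; ring]
        exact PySem.List.pyRange_one_succ_right (le_add_of_nonneg_right h0t)
      rw [hsplit, List.foldl_append, ih c ht, List.countP_append]
      have hfd : PySem.Int.floordiv (w * L.length + t) w = L.length := by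
        rw [PySem.Int.floordiv_eq_iff_of_pos hw]
        have hc := mul_comm w ((L.length : Nat) : Int)
        push_cast at hle
        constructor
        · linarith
        · linarith [mul_comm ((L.length : Nat) : Int) w]
      have hstep : ∀ c' : Int, pvStep a b w (L ++ [c']) (w * L.length + t)
          = if pvMM a b (w * L.length + t) then L ++ [c' + 1] else L ++ [c'] := by
        intro c'
        unfold pvStep pvMM
        rw [hfd, PySem.List.pySetD_natCast, PySem.List.pyGetD_natCast]
        split
        · simp_all
        · simp_all
      simp only [List.foldl_cons, List.foldl_nil, hstep]
      by_cases hmm : pvMM a b (w * L.length + t) = true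
      · simp [hmm]; ring
      · simp [hmm]

-- the bucket sweep computes exactly the per-window mismatch counts
theorem pvCounts_eq (a b : String) (w : Int) (hw : 0 < w) (N : Nat) :
    (PySem.List.pyRange 0 ((N : Int) * w)).foldl (pvStep a b w) (List.replicate N 0)
      = (PySem.List.pyRange 0 (N : Int)).map (pvCnt a b w) := by
  induction N with
  | zero => simp [PySem.List.pyRange_one_eq_nil (le_refl (0:Int))]
  | succ N ih =>
      have h1 : (0:Int) ≤ (N : Int) * w := by positivity
      have h2 : ((N : Int)) * w ≤ ((N : Nat) + 1 : Nat) * w := by push_cast; nlinarith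
      rw [show (((N : Nat) + 1 : Nat) : Int) * w = ((N + 1 : Nat) : Int) * w by push_cast; ring] at h2 ⊢
      rw [PySem.List.pyRange_one_append 0 ((N : Int) * w) _ h1 h2, List.foldl_append]
      rw [show (List.replicate (N + 1) (0:Int)) = List.replicate N 0 ++ [0] by
            rw [← List.replicate_succ']]
      rw [pvFold_frame a b w _ (List.replicate N 0) [0] ?bound]
      case bound =>
        intro i hi
        rw [PySem.List.mem_pyRange_one] at hi
        have hlt : PySem.Int.floordiv i w < (N : Int) :=
          (PySem.Int.floordiv_lt_iff_lt_mul hw).2 hi.2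
        have hge : (0:Int) ≤ PySem.Int.floordiv i w :=
          (PySem.Int.le_floordiv_iff_mul_le hw).2 (by simpa using hi.1)
        refine ⟨hge, ?_⟩
        simp only [List.length_replicate]
        omega
      rw [ih]
      have hlen : ((PySem.List.pyRange 0 (N : Int)).map (pvCnt a b w)).length = N := by
        simp [PySem.List.length_pyRange_one]
      have hWN : w * (((PySem.List.pyRange 0 (N : Int)).map (pvCnt a b w)).length : Int) = (N : Int) * w := by
        rw [hlen]; ring
      have := pvFold_last a b w hw ((PySem.List.pyRange 0 (N : Int)).map (pvCnt a b w)) w.toNat 0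
        (by omega)
      rw [hlen] at this
      rw [show ((N + 1 : Nat) : Int) * w = (N : Int) * w + (w.toNat : Nat) by push_cast; rw [Int.toNat_of_nonneg (le_of_lt hw)]; ring]
      rw [show ((N : Int) * w) = w * (N : Int) by ring] at *
      rw [this]
      rw [show ((N + 1 : Nat) : Int) = (N : Int) + 1 by push_cast; ring,
          PySem.List.pyRange_one_succ_right (by positivity), List.map_append]
      congr 1
      simp only [List.map_cons, List.map_nil, Int.zero_add]
      congr 1
      unfold pvCnt
      rw [Int.toNat_of_nonneg (le_of_lt hw)]

theorem diferencas_pos (a b : String) (w : Int) (_hw : 0 < w) :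
    diferencas a b w
      = ((PySem.List.pyRange 0 (PySem.Int.floordiv (PySem.Str.len a) w)).filter
            (fun j => decide (3 * pvCnt a b w j ≥ w))).map (fun j => w * j) := by
  unfold diferencas
  have hbody : ∀ (acc : List Int), ∀ i ∈ PySem.List.pyRange 0 (PySem.Int.floordiv (PySem.Str.len a) w),
      (fun lista i =>
        let indice_inicial := w * i
        let dist := distancia_janela a b indice_inicial w
        if 3 * dist ≥ w then lista ++ [indice_inicial] else lista) acc i
      = (fun lista i => if (fun j => decide (3 * pvCnt a b w j ≥ w)) i = true
          then lista ++ [(fun j => w * j) i] else lista) acc i := by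
    intro acc i _
    dsimp only
    rw [dist_janela_eq]
    simp
  rw [PySem.List.foldl_congr_mem _ _ _ _ hbody, PySem.List.foldl_append_if]
  simp

theorem diferencas_alt_pos (a b : String) (w : Int) (hw : 0 < w) :
    diferencas_alt a b w
      = ((PySem.List.pyRange 0 (PySem.Int.floordiv (PySem.Str.len a) w)).filter
            (fun j => decide (3 * pvCnt a b w j ≥ w))).map (fun j => w * j) := by
  unfold diferencas_alt
  have hnum : (0:Int) ≤ PySem.Int.floordiv (PySem.Str.len a) w := by
    apply (PySem.Int.le_floordiv_iff_mul_le hw).2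
    simp [PySem.Str.len_eq]
  set N : Nat := (PySem.Int.floordiv (PySem.Str.len a) w).toNat with hN
  have hNum : PySem.Int.floordiv (PySem.Str.len a) w = (N : Int) := by
    rw [hN, Int.toNat_of_nonneg hnum]
  simp only [PySem.List.len_eq, List.length_replicate]
  have hfold : (PySem.List.pyRange 0 ((N : Int) * w)).foldl
      (fun cs i =>
        if PySem.Str.pyGet? a i ≠ PySem.Str.pyGet? b i then
          PySem.List.pySetD cs (PySem.Int.floordiv i w)
            (PySem.List.pyGetD cs (PySem.Int.floordiv i w) 0 + 1)
        else cs) (List.replicate N (0:Int))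
      = (PySem.List.pyRange 0 (N : Int)).map (pvCnt a b w) := by
    rw [show (fun (cs : List Int) (i : Int) =>
        if PySem.Str.pyGet? a i ≠ PySem.Str.pyGet? b i then
          PySem.List.pySetD cs (PySem.Int.floordiv i w)
            (PySem.List.pyGetD cs (PySem.Int.floordiv i w) 0 + 1)
        else cs) = pvStep a b w from rfl]
    exact pvCounts_eq a b w hw N
  rw [hfold]
  rw [PySem.List.enumerate_eq_map_pyRange _ 0]
  have hlen2 : PySem.List.len ((PySem.List.pyRange 0 (N : Int)).map (pvCnt a b w)) = (N : Int) := by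
    simp [PySem.List.len_eq, PySem.List.length_pyRange_one]
  rw [hlen2]
  rw [List.foldl_map]
  have hbody : ∀ (acc : List Int), ∀ j ∈ PySem.List.pyRange 0 (N : Int),
      (fun (out : List Int) (j : Int) =>
        if 3 * (PySem.List.pyGetD ((PySem.List.pyRange 0 (N : Int)).map (pvCnt a b w)) j 0) ≥ w
        then out ++ [w * j] else out) acc j
      = (fun out j => if (fun j => decide (3 * pvCnt a b w j ≥ w)) j = true
          then out ++ [(fun j => w * j) j] else out) acc j := by
    intro acc j hj
    rw [PySem.List.mem_pyRange_one] at hj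
    dsimp only
    rw [PySem.List.pyGetD_map_pyRange_of_nonneg _ _ _ _ hj.1 hj.2]
    simp
  rw [PySem.List.foldl_congr_mem _ _ _ _ hbody, PySem.List.foldl_append_if]
  rw [hNum]
  simp

theorem diferencas_neg (a b : String) (w : Int) (hw : w < 0) :
    diferencas a b w = [] ∧ diferencas_alt a b w = [] := by
  have hlen : (0:Int) ≤ PySem.Str.len a := by simp [PySem.Str.len_eq]
  have hnum : PySem.Int.floordiv (PySem.Str.len a) w ≤ 0 := by
    by_contra h
    rw [not_le] at h
    have hmul := PySem.Int.floordiv_mul_add_mod (PySem.Str.len a) w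
    have hmod := PySem.Int.mod_neg_bounds (a := PySem.Str.len a) hw
    nlinarith
  constructor
  · unfold diferencas
    rw [PySem.List.pyRange_one_eq_nil hnum]
    rfl
  · unfold diferencas_alt
    have : (PySem.Int.floordiv (PySem.Str.len a) w).toNat = 0 := by omega
    rw [this]
    simp [PySem.List.len_eq, PySem.List.pyRange_one_eq_nil (le_refl (0:Int)),
      PySem.List.enumerate_nil]

-- ===== VERDICT (by name: the statement is the Claim_ definition above) =====
theorem diferencas_spec : Claim_equal_diferencas := by
  intro a b w _ hpre
  unfold Spec_diferencas
  rcases lt_trichotomy w 0 with hw | hw | hw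
  · rw [(diferencas_neg a b w hw).1, (diferencas_neg a b w hw).2]
  · exact absurd hw hpre.1
  · rw [diferencas_pos a b w hw, diferencas_alt_pos a b w hw]
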